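-- pv_equiv track=rewrite | github.com/rxia/PyNeuroSG | misc_tools.py | str_common
-- ===== SOURCE A (Python) =====
-- def str_common(list_of_strings):
--     """
--     Get common char of a list of string, returns a string, with mis-match positions replaced using "_"
--     e.g. str_common(['abc','adc']) returns 'a_c'
--
--     :param list_of_strings: a list of strings
--     :return:  a string
--     """
--     len_min = 0
--     string_out = ''
--     for char in zip(*list_of_strings):
--         if len(set(char)) is 1:
--             char_cur=char[0]
--         else:
--             char_cur = '_'
--         string_out = string_out+char_cur
--     return string_out
-- ===== SOURCE B (Python) =====
-- def str_common(list_of_strings):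
--     if not list_of_strings:
--         return ''
--     m = min(len(s) for s in list_of_strings)
--     res = list(list_of_strings[0][:m])
--     for s in list_of_strings[1:]:
--         for i in range(m):
--             if s[i] != res[i]:
--                 res[i] = '_'
--     return ''.join(res)
-- ===== Notes on version B (the rewrite author's own statement) =====
-- stated objective: alternative
-- what changed: Instead of transposing the strings into columns with zip and building a set per column, B keeps a running pattern list seeded from the first string (truncated to the min length) and marks positions '_' in one pass over the remaining strings; no per-column tuples or sets are built.
import Mathlib
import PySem

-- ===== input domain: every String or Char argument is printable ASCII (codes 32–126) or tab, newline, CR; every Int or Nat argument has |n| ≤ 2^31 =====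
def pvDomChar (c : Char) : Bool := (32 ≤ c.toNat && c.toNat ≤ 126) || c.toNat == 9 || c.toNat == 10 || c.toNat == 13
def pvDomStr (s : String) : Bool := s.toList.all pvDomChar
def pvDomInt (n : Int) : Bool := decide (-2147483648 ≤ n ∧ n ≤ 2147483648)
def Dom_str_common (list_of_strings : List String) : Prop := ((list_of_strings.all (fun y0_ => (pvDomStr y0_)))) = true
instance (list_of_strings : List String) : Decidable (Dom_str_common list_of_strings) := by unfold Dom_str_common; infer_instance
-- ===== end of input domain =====

-- B replaces A's zip-transpose + per-column set test by a running pattern list updated in place ('alternative' decomposition; same asymptotic cost).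

-- ===== PORT A =====
-- zip(*list_of_strings) is modelled as the list of columns i < m, m = min length.
def str_common (list_of_strings : List String) : String :=
  let ls := list_of_strings.map String.toList
  let m := (PySem.List.min? (ls.map List.length) (fun n => n)).getD 0
  let cols := (List.range m).map (fun i => ls.map (fun l => l.getD i ' '))
  String.ofList (cols.foldl (fun acc col =>
    acc ++ [if PySem.Set.len (PySem.Set.ofList col) = 1 then col.getD 0 ' ' else '_']) [])

-- ===== PORT B =====
def str_common_alt (list_of_strings : List String) : String :=
  match list_of_strings with
  | [] => ""
  | s :: rest =>
    let m := (PySem.List.min? ((s :: rest).map (fun t => t.toList.length)) (fun n => n)).getD 0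
    let res := rest.foldl (fun r t =>
      (List.range m).foldl (fun r i =>
        if t.toList.getD i ' ' ≠ r.getD i ' ' then r.set i '_' else r) r) (s.toList.take m)
    String.ofList res

-- ===== PRECONDITION & SPEC =====
def Spec_str_common (list_of_strings : List String) (out : String) : Prop := out = str_common_alt list_of_strings
instance (list_of_strings : List String) (out : String) : Decidable (Spec_str_common list_of_strings out) := by unfold Spec_str_common; infer_instance

-- ===== CLAIM (what is proved, stated in full; the proofs are below) =====
def Claim_equal_str_common : Prop := ∀ (list_of_strings : List String), Dom_str_common list_of_strings → Spec_str_common list_of_strings (str_common list_of_strings)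

-- ===== LEMMAS AND PROOFS =====

-- the pattern after processing the strings `ps` against first string `s0`, at position j
def pvPat (s0 : List Char) (ps : List (List Char)) (j : Nat) : Char :=
  if ps.all (fun t => t.getD j ' ' == s0.getD j ' ') then s0.getD j ' ' else '_'

theorem pv_take_eq_map_range (l : List Char) (m : Nat) (h : m ≤ l.length) :
    l.take m = (List.range m).map (fun j => l.getD j ' ') := by
  apply List.ext_getElem
  · simp [h]
  · intro i h1 h2
    simp at h2
    simp [List.getD_eq_getElem?_getD, List.getElem?_eq_getElem (show i < l.length by omega)]

theorem pv_inner_get (t r : List Char) (m : Nat) : ∀ j,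
    ((List.range m).foldl (fun r i => if t.getD i ' ' ≠ r.getD i ' ' then r.set i '_' else r) r)[j]?
    = if j < m then r[j]?.map (fun c => if t.getD j ' ' ≠ c then '_' else c) else r[j]? := by
  induction m with
  | zero => simp
  | succ m ih =>
    intro j
    rw [List.range_succ, List.foldl_append]
    simp only [List.foldl_cons, List.foldl_nil]
    set R := (List.range m).foldl (fun r i => if t.getD i ' ' ≠ r.getD i ' ' then r.set i '_' else r) r with hR
    have hRm : R[m]? = r[m]? := by rw [ih m]; simp
    have hRgetD : R.getD m ' ' = r.getD m ' ' := by
      rw [List.getD_eq_getElem?_getD, List.getD_eq_getElem?_getD, hRm]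
    rcases Nat.lt_trichotomy j m with hj | hj | hj
    · have h1 : (if t.getD m ' ' ≠ R.getD m ' ' then R.set m '_' else R)[j]? = R[j]? := by
        split
        · exact List.getElem?_set_ne (by omega)
        · rfl
      rw [h1, ih j, if_pos hj, if_pos (show j < m + 1 by omega)]
    · subst hj
      rw [if_pos (Nat.lt_succ_self j)]
      by_cases hc : t.getD j ' ' ≠ r.getD j ' '
      · rw [if_pos (by rw [hRgetD]; exact hc), List.getElem?_set_self', hRm]
        cases hr : r[j]? with
        | none => simp
        | some c =>
          have hrd : r.getD j ' ' = c := by rw [List.getD_eq_getElem?_getD, hr]; rfl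
          simp only [Option.map_some]
          rw [if_pos (hrd ▸ hc)]
          rfl
      · rw [if_neg (by rw [hRgetD]; exact hc), hRm]
        simp only [ne_eq, not_not] at hc
        cases hr : r[j]? with
        | none => simp
        | some c =>
          have hrd : r.getD j ' ' = c := by rw [List.getD_eq_getElem?_getD, hr]; rfl
          simp only [Option.map_some]
          rw [if_neg (not_ne_iff.mpr (hc.trans hrd))]
    · have h1 : (if t.getD m ' ' ≠ R.getD m ' ' then R.set m '_' else R)[j]? = R[j]? := by
        split
        · exact List.getElem?_set_ne (by omega)
        · rfl
      rw [h1, ih j, if_neg (show ¬ j < m by omega), if_neg (show ¬ j < m + 1 by omega)]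

theorem pv_inner_pat (s0 t : List Char) (ps : List (List Char)) (m : Nat) :
    (List.range m).foldl (fun r i => if t.getD i ' ' ≠ r.getD i ' ' then r.set i '_' else r)
      ((List.range m).map (fun j => pvPat s0 ps j))
    = (List.range m).map (fun j => pvPat s0 (ps ++ [t]) j) := by
  apply List.ext_getElem?
  intro j
  rw [pv_inner_get]
  by_cases hj : j < m
  · rw [if_pos hj]
    simp only [List.getElem?_map, List.getElem?_range hj, Option.map_some]
    congr 1
    by_cases hall : (ps.all fun u => u.getD j ' ' == s0.getD j ' ') = true
    · have hp : pvPat s0 ps j = s0.getD j ' ' := by unfold pvPat; rw [if_pos hall]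
      by_cases heq : t.getD j ' ' = s0.getD j ' '
      · rw [hp, if_neg (not_ne_iff.mpr heq)]
        unfold pvPat
        rw [if_pos (by simp only [List.all_append, List.all_cons, List.all_nil, hall,
              Bool.true_and, Bool.and_true, beq_iff_eq]; exact heq)]
      · rw [hp, if_pos heq]
        unfold pvPat
        rw [if_neg (by simp only [List.all_append, List.all_cons, List.all_nil,
              Bool.and_true, Bool.and_eq_true, beq_iff_eq]; exact fun h => heq h.2)]
    · have h0 : (ps.all fun u => u.getD j ' ' == s0.getD j ' ') = false :=
        eq_false_of_ne_true hall
      have hp : pvPat s0 ps j = '_' := by unfold pvPat; rw [if_neg hall]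
      have hp2 : pvPat s0 (ps ++ [t]) j = '_' := by
        unfold pvPat
        rw [if_neg (by
          simp only [List.all_append, h0, Bool.false_and]
          exact Bool.false_ne_true)]
      rw [hp, hp2]
      split <;> rfl
  · rw [if_neg hj]
    simp [hj]

theorem pv_foldB (s0 : List Char) (m : Nat) (rest ps : List (List Char)) :
    rest.foldl (fun r t =>
        (List.range m).foldl (fun r i => if t.getD i ' ' ≠ r.getD i ' ' then r.set i '_' else r) r)
      ((List.range m).map (fun j => pvPat s0 ps j))
    = (List.range m).map (fun j => pvPat s0 (ps ++ rest) j) := by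
  induction rest generalizing ps with
  | nil => simp
  | cons t rest ih =>
    simp only [List.foldl_cons]
    rw [pv_inner_pat, ih]
    simp

theorem pv_setlen_one (a : Char) (l : List Char) :
    (PySem.Set.len (PySem.Set.ofList (a :: l)) = 1) ↔ l.all (· == a) = true := by
  constructor
  · intro h
    have hlen : (PySem.Set.ofList (a :: l)).length = 1 := by simpa [PySem.Set.len] using h
    obtain ⟨b, hb⟩ := List.length_eq_one_iff.mp hlen
    have ha : a ∈ PySem.Set.ofList (a :: l) := (PySem.Set.mem_ofList _ _).mpr (by simp)
    rw [hb] at ha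
    simp at ha
    rw [List.all_eq_true]
    intro x hx
    have hxm : x ∈ PySem.Set.ofList (a :: l) := (PySem.Set.mem_ofList _ _).mpr (by simp [hx])
    rw [hb] at hxm
    simp at hxm
    simp [hxm, ha]
  · intro h
    have hofl : PySem.Set.ofList (a :: l) = [a] := by
      rw [PySem.Set.ofList_eq_foldl]
      simp only [List.foldl_cons]
      have step0 : PySem.Set.add ([] : List Char) a = [a] := by rfl
      rw [step0]
      clear step0
      induction l with
      | nil => rfl
      | cons x xs ih =>
        simp only [List.all_cons, Bool.and_eq_true, beq_iff_eq] at h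
        simp only [List.foldl_cons]
        have hadd : PySem.Set.add [a] x = [a] := by
          simp [PySem.Set.add, PySem.Set.contains, h.1]
        rw [hadd]
        exact ih (by simp [List.all_eq_true] at h ⊢; exact h.2)
    rw [hofl]
    rfl

-- foldl-append builds a map
theorem pv_foldl_append_map {α β : Type} (l : List α) (f : α → β) (init : List β) :
    l.foldl (fun acc x => acc ++ [f x]) init = init ++ l.map f := by
  induction l generalizing init with
  | nil => simp
  | cons x xs ih => simp [ih]

theorem str_common_eq (xs : List String) : str_common xs = str_common_alt xs := by
  cases xs with
  | nil => rfl
  | cons s rest =>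
    unfold str_common str_common_alt
    simp only [List.map_cons]
    have hmap : List.map List.length (List.map String.toList rest)
        = rest.map (fun t => t.toList.length) := by
      simp [List.map_map, Function.comp]
    rw [hmap]
    set lens := (s.toList.length :: rest.map (fun t => t.toList.length)) with hlens
    obtain ⟨m0, hm0⟩ : ∃ m0, PySem.List.min? lens (fun n => n) = some m0 := by
      cases h : PySem.List.min? lens (fun n => n) with
      | none =>
        rw [PySem.List.min?_eq_none_iff] at h
        simp [hlens] at h
      | some v => exact ⟨v, rfl⟩
    have hmin : ∀ y ∈ lens, m0 ≤ y := by
      intro y hy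
      exact PySem.List.min?_isMin hm0 y hy
    have hs0 : m0 ≤ s.toList.length := hmin _ (by simp [hlens])
    rw [hm0]
    simp only [Option.getD_some]
    -- B side
    rw [pv_take_eq_map_range s.toList m0 hs0]
    have hinit : (List.range m0).map (fun j => s.toList.getD j ' ')
        = (List.range m0).map (fun j => pvPat s.toList [] j) := by
      simp [pvPat]
    rw [hinit]
    have hfmap : rest.foldl (fun r t =>
        (List.range m0).foldl (fun r i => if t.toList.getD i ' ' ≠ r.getD i ' ' then r.set i '_' else r) r)
        ((List.range m0).map (fun j => pvPat s.toList [] j))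
        = (rest.map String.toList).foldl (fun r t =>
        (List.range m0).foldl (fun r i => if t.getD i ' ' ≠ r.getD i ' ' then r.set i '_' else r) r)
        ((List.range m0).map (fun j => pvPat s.toList [] j)) := by
      rw [List.foldl_map]
    rw [hfmap, pv_foldB]
    -- A side
    rw [pv_foldl_append_map]
    simp only [List.nil_append, List.map_map]
    congr 1
    apply List.map_congr_left
    intro i _
    simp only [Function.comp_apply, List.getD_cons_zero]
    rw [← List.map_map]
    by_cases hcol : ((rest.map String.toList).map (fun l => l.getD i ' ')).all (· == s.toList.getD i ' ') = true
    · rw [if_pos ((pv_setlen_one _ _).mpr hcol)]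
      unfold pvPat
      rw [if_pos (by simpa [List.all_map] using hcol)]
    · rw [if_neg (fun h => hcol ((pv_setlen_one _ _).mp h))]
      unfold pvPat
      rw [if_neg (by simp [List.all_map] at hcol ⊢; simpa using hcol)]

-- ===== VERDICT (by name: the statement is the Claim_ definition above) =====
theorem str_common_spec : Claim_equal_str_common := by
  intro xs _
  unfold Spec_str_common
  exact str_common_eq xs
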